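-- pv_equiv track=rewrite | github.com/leanprover/lean4 | script/profiler/lean_demangle.py | _is_valid_string_mangle
-- ===== SOURCE A (Python) =====
-- def _is_ascii_alnum(ch):
--     """Check if ch is an ASCII letter or digit (matching Lean's isAlpha/isDigit)."""
--     return ('a' <= ch <= 'z') or ('A' <= ch <= 'Z') or ('0' <= ch <= '9')
--
-- def _parse_hex(s, pos, n):
--     """Parse n lowercase hex digits at pos. Returns (new_pos, value) or None."""
--     if pos + n > len(s):
--         return None
--     val = 0
--     for i in range(n):
--         c = s[pos + i]
--         if '0' <= c <= '9':
--             val = (val << 4) | (ord(c) - ord('0'))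
--         elif 'a' <= c <= 'f':
--             val = (val << 4) | (ord(c) - ord('a') + 10)
--         else:
--             return None
--     return (pos + n, val)
--
-- def _is_valid_string_mangle(s):
--     """Check if s is a valid output of String.mangle (no trailing bare _)."""
--     pos = 0
--     length = len(s)
--     while pos < length:
--         ch = s[pos]
--         if _is_ascii_alnum(ch):
--             pos += 1
--         elif ch == '_':
--             if pos + 1 >= length:
--                 return False  # trailing bare _
--             nch = s[pos + 1]
--             if nch == '_':
--                 pos += 2
--             elif nch == 'x' and _parse_hex(s, pos + 2, 2) is not None:
--                 pos = _parse_hex(s, pos + 2, 2)[0]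
--             elif nch == 'u' and _parse_hex(s, pos + 2, 4) is not None:
--                 pos = _parse_hex(s, pos + 2, 4)[0]
--             elif nch == 'U' and _parse_hex(s, pos + 2, 8) is not None:
--                 pos = _parse_hex(s, pos + 2, 8)[0]
--             else:
--                 return False
--         else:
--             return False
--     return True
-- ===== SOURCE B (Python) =====
-- def _is_valid_string_mangle(s):
--     """Single-pass DFA: pending = -1 right after '_', k > 0 = hex digits still owed,
--     0 = token boundary. No lookahead, no index arithmetic, no hex re-parsing."""
--     pending = 0
--     for ch in s:
--         if pending == -1:
--             if ch == '_':
--                 pending = 0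
--             elif ch == 'x':
--                 pending = 2
--             elif ch == 'u':
--                 pending = 4
--             elif ch == 'U':
--                 pending = 8
--             else:
--                 return False
--         elif pending > 0:
--             if '0' <= ch <= '9' or 'a' <= ch <= 'f':
--                 pending -= 1
--             else:
--                 return False
--         elif ch == '_':
--             pending = -1
--         elif 'a' <= ch <= 'z' or 'A' <= ch <= 'Z' or '0' <= ch <= '9':
--             pass
--         else:
--             return False
--     return pending == 0
-- ===== Notes on version B (the rewrite author's own statement) =====
-- stated objective: alternative
-- what changed: Replaced A's position-pointer scanner with lookahead and a twice-called _parse_hex helper by a single-pass finite-state machine (one integer state: -1 = just after '_', k>0 = hex digits still owed, 0 = token boundary) that examines each character exactly once.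
import Mathlib
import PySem

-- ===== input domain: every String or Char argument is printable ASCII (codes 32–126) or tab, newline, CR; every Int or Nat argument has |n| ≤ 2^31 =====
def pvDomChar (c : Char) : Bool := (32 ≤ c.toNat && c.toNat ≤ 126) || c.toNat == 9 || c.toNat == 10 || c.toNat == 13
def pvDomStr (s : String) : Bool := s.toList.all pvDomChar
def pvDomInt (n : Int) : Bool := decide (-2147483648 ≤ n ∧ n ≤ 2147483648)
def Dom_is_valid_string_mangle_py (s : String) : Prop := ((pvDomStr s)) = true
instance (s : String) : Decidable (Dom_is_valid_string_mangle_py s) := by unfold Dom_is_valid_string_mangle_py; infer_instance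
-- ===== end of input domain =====

-- B replaces A's lookahead scanner (position pointer + twice-called _parse_hex helper) by a
-- single-pass finite-state machine over the characters; objective: alternative (same O(n) cost).

-- ===== PORT A =====

-- _is_ascii_alnum
def pvAlnumA (ch : Char) : Bool :=
  ('a' ≤ ch && ch ≤ 'z') || ('A' ≤ ch && ch ≤ 'Z') || ('0' ≤ ch && ch ≤ '9')

-- the 'for i in range(n)' loop of _parse_hex, with its early 'return None';
-- val stays a Nat: Python's val is nonnegative throughout, so <<< and ||| are exact
def pvParseHexGo (l : List Char) (pos n : Nat) (i : Nat) (val : Nat) : Option (Nat × Nat) :=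
  if i < n then
    let c := l.getD (pos + i) ' '
    if '0' ≤ c && c ≤ '9' then
      pvParseHexGo l pos n (i + 1) ((val <<< 4) ||| (c.toNat - '0'.toNat))
    else if 'a' ≤ c && c ≤ 'f' then
      pvParseHexGo l pos n (i + 1) ((val <<< 4) ||| (c.toNat - 'a'.toNat + 10))
    else none
  else some (pos + n, val)
termination_by n - i

-- _parse_hex
def pvParseHexA (l : List Char) (pos n : Nat) : Option (Nat × Nat) :=
  if pos + n > l.length then none
  else pvParseHexGo l pos n 0 0

-- the while loop of _is_valid_string_mangle; fuel = l.length - pos bounds the iterations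
-- (pos strictly increases each round), so the fuel-0 branch is only reached with pos ≥ length,
-- where the Python loop also exits returning True
def pvLoopA (l : List Char) : Nat → Nat → Bool
  | 0, _ => true
  | fuel + 1, pos =>
    if pos < l.length then
      let ch := l.getD pos ' '
      if pvAlnumA ch then pvLoopA l fuel (pos + 1)
      else if ch = '_' then
        if pos + 1 ≥ l.length then false
        else
          let nch := l.getD (pos + 1) ' '
          if nch = '_' then pvLoopA l fuel (pos + 2)
          else if nch = 'x' && (pvParseHexA l (pos + 2) 2).isSome then
            pvLoopA l fuel ((pvParseHexA l (pos + 2) 2).getD (0, 0)).1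
          else if nch = 'u' && (pvParseHexA l (pos + 2) 4).isSome then
            pvLoopA l fuel ((pvParseHexA l (pos + 2) 4).getD (0, 0)).1
          else if nch = 'U' && (pvParseHexA l (pos + 2) 8).isSome then
            pvLoopA l fuel ((pvParseHexA l (pos + 2) 8).getD (0, 0)).1
          else false
      else false
    else true

def is_valid_string_mangle_py (s : String) : Bool :=
  pvLoopA s.toList s.toList.length 0

-- ===== PORT B =====

def pvHexB (ch : Char) : Bool := ('0' ≤ ch && ch ≤ '9') || ('a' ≤ ch && ch ≤ 'f')

-- the for loop of B: pending = -1 right after '_', k > 0 = hex digits still owed, 0 = boundary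
def pvDfaB : List Char → Int → Bool
  | [], pending => pending == 0
  | ch :: rest, pending =>
    if pending == -1 then
      if ch = '_' then pvDfaB rest 0
      else if ch = 'x' then pvDfaB rest 2
      else if ch = 'u' then pvDfaB rest 4
      else if ch = 'U' then pvDfaB rest 8
      else false
    else if pending > 0 then
      if pvHexB ch then pvDfaB rest (pending - 1) else false
    else
      if ch = '_' then pvDfaB rest (-1)
      else if ('a' ≤ ch && ch ≤ 'z') || ('A' ≤ ch && ch ≤ 'Z') || ('0' ≤ ch && ch ≤ '9') then
        pvDfaB rest 0
      else false

def is_valid_string_mangle_py_alt (s : String) : Bool :=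
  pvDfaB s.toList 0

-- ===== PRECONDITION & SPEC =====
def Spec_is_valid_string_mangle_py (s : String) (out : Bool) : Prop := out = is_valid_string_mangle_py_alt s
instance (s : String) (out : Bool) : Decidable (Spec_is_valid_string_mangle_py s out) := by unfold Spec_is_valid_string_mangle_py; infer_instance

-- ===== CLAIM (what is proved, stated in full; the proofs are below) =====
def Claim_equal_is_valid_string_mangle_py : Prop := ∀ (s : String), Dom_is_valid_string_mangle_py s → Spec_is_valid_string_mangle_py s (is_valid_string_mangle_py s)

-- ===== LEMMAS AND PROOFS =====

theorem pvParseHexGo_isSome (l : List Char) (pos n : Nat) :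
    ∀ i val, (pvParseHexGo l pos n i val).isSome = true ↔
      (∀ j, i ≤ j → j < n → pvHexB (l.getD (pos + j) ' ') = true) := by
  intro i val
  fun_induction pvParseHexGo l pos n i val with
  | case1 i val hlt c hdig ih =>
    rw [ih]
    constructor
    · intro h j hij hjn
      rcases Nat.eq_or_lt_of_le hij with rfl | h'
      · simp only [pvHexB, Bool.or_eq_true]; left; exact hdig
      · exact h j h' hjn
    · intro h j hij hjn; exact h j (by omega) hjn
  | case2 i val hlt c hdig haf ih =>
    rw [ih]
    constructor
    · intro h j hij hjn
      rcases Nat.eq_or_lt_of_le hij with rfl | h'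
      · simp only [pvHexB, Bool.or_eq_true]; right; exact haf
      · exact h j h' hjn
    · intro h j hij hjn; exact h j (by omega) hjn
  | case3 i val hlt c hdig haf =>
    simp only [Option.isSome_none, Bool.false_eq_true, false_iff]
    intro h
    have hc := h i le_rfl hlt
    simp only [pvHexB, Bool.or_eq_true] at hc
    rcases hc with hc | hc
    · exact hdig hc
    · exact haf hc
  | case4 i val hge =>
    simp only [Option.isSome_some, true_iff]
    intro j hij hjn; omega
theorem pvParseHexGo_fst (l : List Char) (pos n : Nat) :
    ∀ i val x, pvParseHexGo l pos n i val = some x → x.1 = pos + n := by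
  intro i val x
  fun_induction pvParseHexGo l pos n i val with
  | case1 i val hlt c hdig ih => exact ih
  | case2 i val hlt c hdig haf ih => exact ih
  | case3 i val hlt c hdig haf => intro h; cases h
  | case4 i val hge => intro h; cases h; rfl
theorem pvParseHexA_isSome (l : List Char) (pos n : Nat) :
    (pvParseHexA l pos n).isSome = true ↔
      (pos + n ≤ l.length ∧ ∀ j, j < n → pvHexB (l.getD (pos + j) ' ') = true) := by
  unfold pvParseHexA
  split
  · simp; omega
  · rw [pvParseHexGo_isSome]
    constructor
    · intro h; exact ⟨by omega, fun j hj => h j (Nat.zero_le j) hj⟩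
    · intro h j _ hj; exact h.2 j hj

theorem pvParseHexA_fst (l : List Char) (pos n : Nat) (x : Nat × Nat)
    (h : pvParseHexA l pos n = some x) : x.1 = pos + n := by
  unfold pvParseHexA at h
  split at h
  · cases h
  · exact pvParseHexGo_fst l pos n 0 0 x h

theorem pvDfaB_cons_pos (c : Char) (r : List Char) (p : Int) (hp : 0 < p) :
    pvDfaB (c :: r) p = if pvHexB c then pvDfaB r (p - 1) else false := by
  have h1 : (p == -1) = false := by rw [beq_eq_false_iff_ne]; omega
  simp [pvDfaB, h1, hp]

theorem pvDfaB_hex_ok : ∀ (n : Nat) (t : List Char),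
    n ≤ t.length → (∀ j, j < n → pvHexB (t.getD j ' ') = true) →
    pvDfaB t (n : Int) = pvDfaB (t.drop n) 0 := by
  intro n
  induction n with
  | zero => intro t _ _; simp
  | succ m ih =>
    intro t hlen hhex
    match t with
    | [] => simp at hlen
    | c :: r =>
      have hc : pvHexB c = true := by simpa using hhex 0 (Nat.succ_pos m)
      rw [pvDfaB_cons_pos c r _ (by exact_mod_cast Nat.succ_pos m), if_pos hc]
      have hcast : ((m + 1 : Nat) : Int) - 1 = ((m : Nat) : Int) := by push_cast; ring
      rw [hcast]
      have := ih r (by simpa using hlen) (fun j hj => by simpa using hhex (j + 1) (by omega))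
      simpa using this

theorem pvDfaB_hex_fail : ∀ (n : Nat) (t : List Char), 0 < n →
    ¬ (n ≤ t.length ∧ ∀ j, j < n → pvHexB (t.getD j ' ') = true) →
    pvDfaB t (n : Int) = false := by
  intro n
  induction n with
  | zero => intro t h; omega
  | succ m ih =>
    intro t _ hbad
    match t with
    | [] => simp [pvDfaB]; omega
    | c :: r =>
      rw [pvDfaB_cons_pos c r _ (by exact_mod_cast Nat.succ_pos m)]
      by_cases hc : pvHexB c = true
      · rw [if_pos hc]
        have hm : 0 < m := by
          rcases Nat.eq_zero_or_pos m with rfl | h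
          · exfalso; apply hbad
            refine ⟨by simp, fun j hj => ?_⟩
            interval_cases j
            simpa using hc
          · exact h
        have hcast : ((m + 1 : Nat) : Int) - 1 = ((m : Nat) : Int) := by push_cast; ring
        rw [hcast]
        apply ih r hm
        rintro ⟨hl, hh⟩
        apply hbad
        refine ⟨by simpa using Nat.succ_le_succ hl, fun j hj => ?_⟩
        match j with
        | 0 => simpa using hc
        | j' + 1 => simpa using hh j' (by omega)
      · rw [if_neg hc]
theorem pvGetD_drop (l : List Char) (k j : Nat) (h : k + j < l.length) :
    (l.drop k).getD j ' ' = l.getD (k + j) ' ' := by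
  rw [List.getD_eq_getElem _ _ (by simp [List.length_drop]; omega), List.getD_eq_getElem _ _ h,
    List.getElem_drop]

theorem pvHexA_to_dfa (l : List Char) (k n : Nat) (hn : 0 < n) (f : Nat)
    (ih : ∀ p, l.length ≤ f + p → pvLoopA l f p = pvDfaB (l.drop p) 0)
    (hfuel : l.length ≤ f + k) :
    (if (pvParseHexA l k n).isSome then pvLoopA l f ((pvParseHexA l k n).getD (0, 0)).1
     else false) = pvDfaB (l.drop k) (n : Int) := by
  cases hsome : pvParseHexA l k n with
  | some x =>
    have hfst := pvParseHexA_fst l k n x hsome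
    have hch := (pvParseHexA_isSome l k n).mp (by rw [hsome]; rfl)
    simp only [Option.isSome_some, if_pos, Option.getD_some, hfst]
    rw [ih (k + n) (by omega)]
    rw [pvDfaB_hex_ok n (l.drop k) (by simp [List.length_drop]; omega)
      (fun j hj => by rw [pvGetD_drop l k j (by omega)]; exact hch.2 j hj)]
    rw [List.drop_drop]
  | none =>
    have hnot : ¬ (k + n ≤ l.length ∧ ∀ j, j < n → pvHexB (l.getD (k + j) ' ') = true) := by
      intro h
      have := (pvParseHexA_isSome l k n).mpr h
      rw [hsome] at this; simp at this
    simp only [Option.isSome_none, Bool.false_eq_true, if_false]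
    rw [pvDfaB_hex_fail n (l.drop k) hn]
    intro ⟨h1, h2⟩
    apply hnot
    refine ⟨by simp [List.length_drop] at h1; omega, fun j hj => ?_⟩
    rw [← pvGetD_drop l k j (by simp [List.length_drop] at h1; omega)]
    exact h2 j hj
theorem pvDfaB_cons_zero (c : Char) (t : List Char) :
    pvDfaB (c :: t) 0 = if c = '_' then pvDfaB t (-1)
      else if pvAlnumA c then pvDfaB t 0
      else false := by
  simp [pvDfaB, pvAlnumA]

theorem pvDfaB_cons_neg1 (c : Char) (t : List Char) :
    pvDfaB (c :: t) (-1) = if c = '_' then pvDfaB t 0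
      else if c = 'x' then pvDfaB t 2
      else if c = 'u' then pvDfaB t 4
      else if c = 'U' then pvDfaB t 8
      else false := by
  simp [pvDfaB]

theorem pvLoopA_eq_pvDfaB (l : List Char) :
    ∀ fuel pos, l.length ≤ fuel + pos → pvLoopA l fuel pos = pvDfaB (l.drop pos) 0 := by
  intro fuel
  induction fuel with
  | zero =>
    intro pos h
    rw [List.drop_eq_nil_of_le (by omega)]
    simp [pvLoopA, pvDfaB]
  | succ f ih =>
    intro pos hle
    by_cases hpos : pos < l.length
    case neg =>
      rw [List.drop_eq_nil_of_le (by omega)]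
      simp [pvLoopA, pvDfaB, hpos]
    case pos =>
      have hdrop : l.drop pos = l.getD pos ' ' :: l.drop (pos + 1) := by
        rw [List.getD_eq_getElem _ _ hpos]; exact List.drop_eq_getElem_cons hpos
      rw [hdrop]
      simp only [pvLoopA, if_pos hpos]
      rw [pvDfaB_cons_zero]
      by_cases ha : pvAlnumA (l.getD pos ' ') = true
      case pos =>
        have hund : ¬ l.getD pos ' ' = '_' := fun e => absurd (e ▸ ha) (by decide)
        rw [if_pos ha, if_neg hund, if_pos ha, ih (pos + 1) (by omega)]
      case neg =>
        rw [if_neg ha]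
        by_cases hu : l.getD pos ' ' = '_'
        case neg =>
          rw [if_neg hu, if_neg hu, if_neg ha]
        case pos =>
          rw [if_pos hu, if_pos hu]
          by_cases hend : pos + 1 ≥ l.length
          case pos =>
            rw [if_pos hend, List.drop_eq_nil_of_le (by omega)]
            simp [pvDfaB]
          case neg =>
            rw [if_neg hend]
            have hdrop2 : l.drop (pos + 1) = l.getD (pos + 1) ' ' :: l.drop (pos + 2) := by
              rw [List.getD_eq_getElem _ _ (by omega)]
              exact List.drop_eq_getElem_cons (by omega)
            rw [hdrop2, pvDfaB_cons_neg1]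
            by_cases h2 : l.getD (pos + 1) ' ' = '_'
            case pos =>
              rw [if_pos h2, if_pos h2, ih (pos + 2) (by omega)]
            case neg =>
              rw [if_neg h2, if_neg h2]
              by_cases hx : l.getD (pos + 1) ' ' = 'x'
              case pos =>
                rw [if_pos hx]
                simp only [hx]
                norm_num
                exact_mod_cast pvHexA_to_dfa l (pos + 2) 2 (by norm_num) f ih (by omega)
              case neg =>
                rw [if_neg hx]
                have hx' : (decide (l.getD (pos + 1) ' ' = 'x')) = false := decide_eq_false hx
                simp only [hx', Bool.false_and, Bool.false_eq_true, if_false]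
                by_cases hu2 : l.getD (pos + 1) ' ' = 'u'
                case pos =>
                  rw [if_pos hu2]
                  simp only [hu2]
                  norm_num
                  exact_mod_cast pvHexA_to_dfa l (pos + 2) 4 (by norm_num) f ih (by omega)
                case neg =>
                  rw [if_neg hu2]
                  have hu2' : (decide (l.getD (pos + 1) ' ' = 'u')) = false := decide_eq_false hu2
                  simp only [hu2', Bool.false_and, Bool.false_eq_true, if_false]
                  by_cases hU : l.getD (pos + 1) ' ' = 'U'
                  case pos =>
                    rw [if_pos hU]
                    simp only [hU]
                    norm_num
                    rw [show ∀ (b x : Bool), (b && x) = if b = true then x else false from by decide]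
                    exact_mod_cast pvHexA_to_dfa l (pos + 2) 8 (by norm_num) f ih (by omega)
                  case neg =>
                    rw [if_neg hU]
                    have hU' : (decide (l.getD (pos + 1) ' ' = 'U')) = false := decide_eq_false hU
                    simp only [hU', Bool.false_and, Bool.false_eq_true, if_false]

-- ===== VERDICT (by name: the statement is the Claim_ definition above) =====
theorem is_valid_string_mangle_py_spec : Claim_equal_is_valid_string_mangle_py := by
  intro s _
  unfold Spec_is_valid_string_mangle_py is_valid_string_mangle_py is_valid_string_mangle_py_alt
  simpa using pvLoopA_eq_pvDfaB s.toList s.toList.length 0 (by omega)
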